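-- pv_equiv track=rewrite | github.com/Iamalos/myblog | app/utils.py | get_enabled_tags
-- ===== SOURCE A (Python) =====
-- from typing import List, Dict, Optional
--
-- def filter_posts(posts: List[Dict], selected_cats: List[str]) -> List[Dict]:
--     """Filter posts by selected categories (AND logic)."""
--     if not selected_cats: return posts
--     return [p for p in posts if all(cat in p.get('tags', []) for cat in selected_cats)]
--
-- def get_enabled_tags(all_posts: List[Dict], selected_cats: List[str], all_tags: List[str]) -> List[str]:
--     """
--     Calculate which tags should be enabled based on current selection.
--     Returns list of enabled tags.
--     """
--     # If no categories selected, enable all tags that appear in at least one post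
--     if not selected_cats:
--         return [tag for tag in all_tags if any(tag in p.get('tags', []) for p in all_posts)]
--
--     enabled_tags = set()
--     for tag in all_tags:
--         # Already selected tags are always enabled (for removal)
--         if tag in selected_cats:
--             enabled_tags.add(tag)
--             continue
--
--         # Check intersection: (Selected + Tag) -> must have >0 posts
--         test_cats = selected_cats + [tag]
--         if filter_posts(all_posts, test_cats):
--             enabled_tags.add(tag)
--
--     return list(enabled_tags)
-- ===== SOURCE B (Python) =====
-- def get_enabled_tags(all_posts, selected_cats, all_tags):
--     """
--     Calculate which tags should be enabled based on current selection.
--     Returns list of enabled tags.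
--     """
--     if not selected_cats:
--         present = set()
--         for p in all_posts:
--             present.update(p.get('tags', []))
--         return [tag for tag in all_tags if tag in present]
--
--     sel = set(selected_cats)
--     # One pass over posts: collect all tags of posts matching the selection.
--     available = set()
--     for p in all_posts:
--         tags = p.get('tags', [])
--         if sel.issubset(tags):
--             available.update(tags)
--
--     enabled = set()
--     for tag in all_tags:
--         if tag in sel or tag in available:
--             enabled.add(tag)
--     return list(enabled)
-- ===== Notes on version B (the rewrite author's own statement) =====
-- stated objective: faster
-- what changed: Instead of re-filtering the whole post list for every candidate tag, B filters posts by the selected categories once, collects the union of tags of the surviving posts into a set, and enables a tag by two O(1)-style set lookups (and precomputes the union of all post tags for the no-selection branch).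
import Mathlib
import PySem

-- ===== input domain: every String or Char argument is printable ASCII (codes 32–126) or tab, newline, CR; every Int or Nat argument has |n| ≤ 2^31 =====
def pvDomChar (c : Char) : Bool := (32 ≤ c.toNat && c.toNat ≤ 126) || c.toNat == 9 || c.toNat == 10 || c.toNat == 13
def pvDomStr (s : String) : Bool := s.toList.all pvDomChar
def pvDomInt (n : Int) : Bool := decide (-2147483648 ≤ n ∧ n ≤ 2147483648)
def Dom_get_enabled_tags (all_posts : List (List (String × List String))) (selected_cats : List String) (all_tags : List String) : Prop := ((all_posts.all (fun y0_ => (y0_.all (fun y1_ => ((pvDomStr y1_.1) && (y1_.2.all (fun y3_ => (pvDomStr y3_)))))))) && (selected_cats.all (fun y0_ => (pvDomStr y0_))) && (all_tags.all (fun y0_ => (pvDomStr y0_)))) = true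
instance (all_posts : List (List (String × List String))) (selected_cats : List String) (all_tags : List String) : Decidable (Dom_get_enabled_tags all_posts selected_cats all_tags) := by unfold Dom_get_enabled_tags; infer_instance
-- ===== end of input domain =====

-- B filters posts by the selected categories once and collects the tags of surviving
-- posts into a set, replacing A's per-tag re-filter of the whole post list.

-- p.get('tags', []) — first-match lookup in the association list, default [] (shared accessor)
def pvGetTags (p : List (String × List String)) : List String :=
  match p.find? (fun kv => kv.1 == "tags") with
  | some kv => kv.2
  | none => []

-- ===== PORT A =====
def filter_posts (posts : List (List (String × List String))) (selected_cats : List String) : List (List (String × List String)) :=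
  if selected_cats = [] then posts
  else posts.filter (fun p => selected_cats.all (fun cat => (pvGetTags p).contains cat))

def get_enabled_tags (all_posts : List (List (String × List String))) (selected_cats : List String) (all_tags : List String) : List String :=
  if selected_cats = [] then
    all_tags.filter (fun tag => all_posts.any (fun p => (pvGetTags p).contains tag))
  else
    let enabled_tags : PySem.Set String :=
      all_tags.foldl (fun s tag =>
        if selected_cats.contains tag then s.add tag
        else if filter_posts all_posts (selected_cats ++ [tag]) ≠ [] then s.add tag
        else s) PySem.Set.empty
    enabled_tags

-- ===== PORT B =====
def get_enabled_tags_alt (all_posts : List (List (String × List String))) (selected_cats : List String) (all_tags : List String) : List String :=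
  if selected_cats = [] then
    let present : PySem.Set String :=
      all_posts.foldl (fun s p => s.update (pvGetTags p)) PySem.Set.empty
    all_tags.filter (fun tag => present.contains tag)
  else
    let sel : PySem.Set String := PySem.Set.ofList selected_cats
    let available : PySem.Set String :=
      all_posts.foldl (fun av p =>
        if sel.issubset (pvGetTags p) then av.update (pvGetTags p) else av) PySem.Set.empty
    let enabled : PySem.Set String :=
      all_tags.foldl (fun e tag =>
        if sel.contains tag || available.contains tag then e.add tag else e) PySem.Set.empty
    enabled

-- ===== PRECONDITION & SPEC =====
def Spec_get_enabled_tags (all_posts : List (List (String × List String))) (selected_cats : List String) (all_tags : List String) (out : List String) : Prop := out = get_enabled_tags_alt all_posts selected_cats all_tags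
instance (all_posts : List (List (String × List String))) (selected_cats : List String) (all_tags : List String) (out : List String) : Decidable (Spec_get_enabled_tags all_posts selected_cats all_tags out) := by unfold Spec_get_enabled_tags; infer_instance

-- ===== CLAIM (what is proved, stated in full; the proofs are below) =====
def Claim_equal_get_enabled_tags : Prop := ∀ (all_posts : List (List (String × List String))) (selected_cats : List String) (all_tags : List String), Dom_get_enabled_tags all_posts selected_cats all_tags → Spec_get_enabled_tags all_posts selected_cats all_tags (get_enabled_tags all_posts selected_cats all_tags)

-- ===== LEMMAS AND PROOFS =====

theorem pv_bool_ext {a b : Bool} (h : a = true ↔ b = true) : a = b := by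
  cases a <;> cases b <;> simp_all

theorem pv_contains_iff (s : PySem.Set String) (t : String) : s.contains t = true ↔ t ∈ s := by
  simp [PySem.Set.contains]

theorem pv_mem_foldl_add (l : List String) (s : PySem.Set String) (t : String) :
    t ∈ List.foldl PySem.Set.add s l ↔ t ∈ s ∨ t ∈ l := by
  induction l generalizing s with
  | nil => simp
  | cons x xs ih =>
    rw [List.foldl_cons, ih, PySem.Set.mem_add]
    simp [List.mem_cons]
    tauto

theorem pv_mem_update (l : List String) (s : PySem.Set String) (t : String) :
    t ∈ s.update l ↔ t ∈ s ∨ t ∈ l := pv_mem_foldl_add l s t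

-- branch 1: membership in the union-of-all-tags set
theorem pv_mem_present (posts : List (List (String × List String))) (s : PySem.Set String) (t : String) :
    t ∈ posts.foldl (fun s p => s.update (pvGetTags p)) s
      ↔ t ∈ s ∨ ∃ p ∈ posts, t ∈ pvGetTags p := by
  induction posts generalizing s with
  | nil => simp
  | cons p ps ih =>
    rw [List.foldl_cons, ih, pv_mem_update]
    simp only [List.mem_cons]
    constructor
    · rintro (⟨h | h⟩ | ⟨q, hq, hqt⟩)
      · exact Or.inl h
      · exact Or.inr ⟨p, Or.inl rfl, h⟩
      · exact Or.inr ⟨q, Or.inr hq, hqt⟩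
    · rintro (h | ⟨q, (rfl | hq), hqt⟩)
      · exact Or.inl (Or.inl h)
      · exact Or.inl (Or.inr hqt)
      · exact Or.inr ⟨q, hq, hqt⟩

-- branch 2: membership in the tags-of-surviving-posts set
theorem pv_mem_available (posts : List (List (String × List String)))
    (cond : List (String × List String) → Bool) (s : PySem.Set String) (t : String) :
    t ∈ posts.foldl (fun av p => if cond p then av.update (pvGetTags p) else av) s
      ↔ t ∈ s ∨ ∃ p ∈ posts, cond p = true ∧ t ∈ pvGetTags p := by
  induction posts generalizing s with
  | nil => simp
  | cons p ps ih =>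
    rw [List.foldl_cons]
    cases h : cond p
    · rw [if_neg (by simp), ih]
      simp only [List.mem_cons]
      constructor
      · rintro (hs | ⟨q, hq, hc, hqt⟩)
        · exact Or.inl hs
        · exact Or.inr ⟨q, Or.inr hq, hc, hqt⟩
      · rintro (hs | ⟨q, (rfl | hq), hc, hqt⟩)
        · exact Or.inl hs
        · exact absurd hc (by simp_all)
        · exact Or.inr ⟨q, hq, hc, hqt⟩
    · rw [if_pos rfl, ih, pv_mem_update]
      simp only [List.mem_cons]
      constructor
      · rintro (⟨hs | hp⟩ | ⟨q, hq, hc, hqt⟩)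
        · exact Or.inl hs
        · exact Or.inr ⟨p, Or.inl rfl, h, hp⟩
        · exact Or.inr ⟨q, Or.inr hq, hc, hqt⟩
      · rintro (hs | ⟨q, (rfl | hq), hc, hqt⟩)
        · exact Or.inl (Or.inl hs)
        · exact Or.inl (Or.inr hqt)
        · exact Or.inr ⟨q, hq, hc, hqt⟩

theorem pv_issubset_iff (xs l : List String) :
    (PySem.Set.ofList xs).issubset l = true ↔ ∀ c ∈ xs, c ∈ l := by
  simp only [PySem.Set.issubset, PySem.Set.contains, List.all_eq_true]
  constructor
  · intro h c hc
    simpa using h c ((PySem.Set.mem_ofList xs c).2 hc)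
  · intro h x hx
    simpa using h x ((PySem.Set.mem_ofList xs x).1 hx)

-- the per-tag decision of A's branch-2 loop equals B's "tag available" test
theorem pv_cond_iff (all_posts : List (List (String × List String)))
    (selected_cats : List String) (hsel : selected_cats ≠ []) (tag : String) :
    (filter_posts all_posts (selected_cats ++ [tag]) ≠ []) ↔
      tag ∈ all_posts.foldl (fun av p =>
          if (PySem.Set.ofList selected_cats).issubset (pvGetTags p) then av.update (pvGetTags p) else av)
        (PySem.Set.empty : PySem.Set String) := by
  rw [pv_mem_available]
  unfold filter_posts
  rw [if_neg (by simp [hsel])]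
  rw [Ne, List.filter_eq_nil_iff]
  push_neg
  constructor
  · rintro ⟨p, hp, hpred⟩
    simp only [List.all_append, List.all_cons, List.all_nil, Bool.and_true,
      Bool.and_eq_true, List.all_eq_true] at hpred
    refine Or.inr ⟨p, hp, ?_, by simpa using hpred.2⟩
    rw [pv_issubset_iff]
    intro c hc
    simpa using hpred.1 c hc
  · rintro (h | ⟨p, hp, hc, hpt⟩)
    · exact absurd h (by simp [PySem.Set.empty])
    · refine ⟨p, hp, ?_⟩
      rw [pv_issubset_iff] at hc
      simp only [List.all_append, List.all_cons, List.all_nil, Bool.and_true,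
        Bool.and_eq_true, List.all_eq_true]
      exact ⟨fun c hcs => by simpa using hc c hcs, by simpa using hpt⟩

-- ===== VERDICT (by name: the statement is the Claim_ definition above) =====
theorem get_enabled_tags_spec : Claim_equal_get_enabled_tags := by
  intro all_posts selected_cats all_tags _
  unfold Spec_get_enabled_tags
  unfold get_enabled_tags get_enabled_tags_alt
  by_cases hsel : selected_cats = []
  · simp only [if_pos hsel]
    apply List.filter_congr
    intro t _
    apply pv_bool_ext
    rw [pv_contains_iff, pv_mem_present, List.any_eq_true]
    simp only [PySem.Set.empty, List.not_mem_nil, false_or]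
    simp
  · simp only [if_neg hsel]
    have hstep : (fun (s : PySem.Set String) tag =>
        if selected_cats.contains tag then s.add tag
        else if filter_posts all_posts (selected_cats ++ [tag]) ≠ [] then s.add tag else s)
      = (fun (e : PySem.Set String) tag =>
        if (PySem.Set.ofList selected_cats).contains tag ||
            (all_posts.foldl (fun av p =>
              if (PySem.Set.ofList selected_cats).issubset (pvGetTags p) then av.update (pvGetTags p) else av)
              (PySem.Set.empty : PySem.Set String)).contains tag then e.add tag else e) := by
      funext s tag
      have h1 : (PySem.Set.ofList selected_cats).contains tag = selected_cats.contains tag := by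
        apply pv_bool_ext
        rw [pv_contains_iff, PySem.Set.mem_ofList]
        simp
      rw [h1]
      cases hc1 : selected_cats.contains tag
      · simp only [Bool.false_or]
        rw [if_neg (by simp)]
        by_cases hc2 : filter_posts all_posts (selected_cats ++ [tag]) ≠ []
        · rw [if_pos hc2,
            if_pos ((pv_contains_iff _ _).2 ((pv_cond_iff all_posts selected_cats hsel tag).1 hc2))]
        · rw [if_neg hc2,
            if_neg (fun h => hc2 ((pv_cond_iff all_posts selected_cats hsel tag).2
              ((pv_contains_iff _ _).1 h)))]
      · simp only [Bool.true_or]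
        simp
    rw [hstep]
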